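-- pv_equiv track=rewrite | github.com/HoangPhan10/python | Test34.py | fermat
-- ===== SOURCE A (Python) =====
-- def binhPhuongCoLap(a,k,n):
--     b=1
--     if k==0 :
--         return b
--     A =a
--     binK = list(bin(k)[::-1].split('b0')[0])
--
--     if int(binK[0])==1:
--         b=a
--     for i in range(1,len(binK)):
--         A = pow(A,2)%n
--         if int(binK[i])==1 :
--             b=(A*b)%n
--     return b
--
-- def fermat(n,t):
--     if n<2:
--         return False
--     if n==2 or n==3:
--         return True
--     if n %2==0 :
--         return False
--     a = 2
--     result = []
--     for i in range(1,t+1):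
--         x = binhPhuongCoLap(a,n-1,n)
--         a+=1
--         if x != 1:
--             return False
--     return True
-- ===== SOURCE B (Python) =====
-- def modexp(a, k, n):
--     if k == 0:
--         return 1
--     h = modexp(a, k // 2, n)
--     r = h * h % n
--     if k % 2 == 1:
--         r = r * a % n
--     return r
--
-- def fermat(n, t):
--     if n < 2:
--         return False
--     if n == 2 or n == 3:
--         return True
--     if n % 2 == 0:
--         return False
--     return all(modexp(a, n - 1, n) == 1 for a in range(2, t + 2))
-- ===== Notes on version B (the rewrite author's own statement) =====
-- stated objective: alternative
-- what changed: The LSB-first bit-string square-and-multiply helper (built from bin(k) string surgery) is replaced by a top-down divide-and-conquer recursive modular exponentiation on k//2, and the base loop with early return becomes an all() over range(2, t+2).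
import Mathlib
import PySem

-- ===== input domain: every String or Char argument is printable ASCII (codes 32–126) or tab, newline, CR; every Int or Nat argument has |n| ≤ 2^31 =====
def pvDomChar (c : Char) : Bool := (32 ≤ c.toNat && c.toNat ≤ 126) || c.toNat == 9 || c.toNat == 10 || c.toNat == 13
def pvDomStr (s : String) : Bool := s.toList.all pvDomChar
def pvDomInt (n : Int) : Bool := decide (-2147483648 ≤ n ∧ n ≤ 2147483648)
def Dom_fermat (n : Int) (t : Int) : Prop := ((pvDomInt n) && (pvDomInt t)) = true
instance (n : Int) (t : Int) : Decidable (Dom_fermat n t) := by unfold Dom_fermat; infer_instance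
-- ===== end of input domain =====

-- B replaces the bit-string LSB-first square-and-multiply with a recursive divide-and-conquer
-- modular exponentiation (alternative decomposition, same cost).

-- ===== PORT A =====
-- 'bin(k)[::-1].split('b0')[0]' yields the LSB-first binary digits of |k| (exact for every k ≠ 0,
-- since the digit block of bin contains no 'b'); ported by hand as this digit-list builder.
def pvBitsLSB (m : Nat) : List Char :=
  if m = 0 then []
  else (if m % 2 == 1 then '1' else '0') :: pvBitsLSB (m / 2)
  termination_by m
  decreasing_by omega

-- 'for i in range(1, len(binK)): A = pow(A,2)%n; if int(binK[i])==1: b=(A*b)%n'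
def pvBhLoop (n : Int) : List Char → Int → Int → Int
  | [], _, b => b
  | c :: rest, A, b =>
    let A' := PySem.Int.mod (A * A) n
    let b' := if c == '1' then PySem.Int.mod (A' * b) n else b
    pvBhLoop n rest A' b'

-- 'if int(binK[0])==1: b=a' then the loop over binK[1:]
def pvBhStart (n : Int) (bits : List Char) (a : Int) : Int :=
  match bits with
  | [] => 1  -- unreachable: k ≠ 0 gives a nonempty digit list
  | c :: rest => pvBhLoop n rest a (if c == '1' then a else 1)

def binhPhuongCoLap (a : Int) (k : Int) (n : Int) : Int :=
  if k == 0 then 1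
  else pvBhStart n (pvBitsLSB k.natAbs) a

-- 'for i in range(1, t+1): x = binhPhuongCoLap(a, n-1, n); a += 1; if x != 1: return False'
-- (range is lazy in Python; the loop is ported as recursion on the counter i)
def pvFermatLoop (n : Int) (t : Int) (i : Int) (a : Int) : Bool :=
  if i < t + 1 then
    let x := binhPhuongCoLap a (n - 1) n
    if x ≠ 1 then false else pvFermatLoop n t (i + 1) (a + 1)
  else true
  termination_by (t + 1 - i).toNat
  decreasing_by omega

def fermat (n : Int) (t : Int) : Bool :=
  if n < 2 then false
  else if n == 2 || n == 3 then true
  else if PySem.Int.mod n 2 == 0 then false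
  else pvFermatLoop n t 1 2

-- ===== PORT B =====
def modexp (a : Int) (k : Int) (n : Int) : Int :=
  if k ≤ 0 then 1  -- Python: 'if k == 0: return 1'; 'k ≤ 0' is a totality guard (every call has k ≥ 0)
  else
    let h := modexp a (PySem.Int.floordiv k 2) n
    let r := PySem.Int.mod (h * h) n
    if PySem.Int.mod k 2 == 1 then PySem.Int.mod (r * a) n else r
  termination_by k.toNat
  decreasing_by
    rw [PySem.Int.floordiv_eq_ediv_of_pos (by omega : (0:Int) < 2)]
    omega

-- 'all(modexp(a, n-1, n) == 1 for a in range(2, t+2))' — the lazy short-circuiting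
-- generator is ported as recursion on the counter a
def pvAltAll (n : Int) (t : Int) (a : Int) : Bool :=
  if a < t + 2 then
    if modexp a (n - 1) n == 1 then pvAltAll n t (a + 1) else false
  else true
  termination_by (t + 2 - a).toNat
  decreasing_by omega

def fermat_alt (n : Int) (t : Int) : Bool :=
  if n < 2 then false
  else if n == 2 || n == 3 then true
  else if PySem.Int.mod n 2 == 0 then false
  else pvAltAll n t 2

-- ===== PRECONDITION & SPEC =====
def Spec_fermat (n : Int) (t : Int) (out : Bool) : Prop := out = fermat_alt n t
instance (n : Int) (t : Int) (out : Bool) : Decidable (Spec_fermat n t out) := by unfold Spec_fermat; infer_instance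

-- ===== CLAIM (what is proved, stated in full; the proofs are below) =====
def Claim_equal_fermat : Prop := ∀ (n : Int) (t : Int), Dom_fermat n t → Spec_fermat n t (fermat n t)

-- ===== LEMMAS AND PROOFS =====

theorem pvGetLast_cons {α : Type} (c : α) (l : List α) (h : l ≠ []) :
    (c :: l).getLast? = l.getLast? := by
  cases l with
  | nil => exact absurd rfl h
  | cons b t => rfl

-- value of an LSB-first digit list
def pvVal : List Char → Nat
  | [] => 0
  | c :: rest => (if c == '1' then 1 else 0) + 2 * pvVal rest

theorem pvVal_bits (m : Nat) : pvVal (pvBitsLSB m) = m := by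
  induction m using Nat.strong_induction_on with
  | _ m ih =>
    rw [pvBitsLSB]
    by_cases h : m = 0
    · simp [h, pvVal]
    · rw [if_neg h]
      simp only [pvVal]
      rw [ih (m / 2) (by omega)]
      have : m % 2 = 1 ∨ m % 2 = 0 := by omega
      rcases this with h2 | h2 <;> simp [h2] <;> omega

theorem pvBits_ne_nil (m : Nat) (hm : 0 < m) : pvBitsLSB m ≠ [] := by
  rw [pvBitsLSB, if_neg (by omega : ¬ m = 0)]
  simp

theorem pvBits_last (m : Nat) (hm : 0 < m) : (pvBitsLSB m).getLast? = some '1' := by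
  induction m using Nat.strong_induction_on with
  | _ m ih =>
    rw [pvBitsLSB, if_neg (by omega : ¬ m = 0)]
    by_cases h1 : m = 1
    · subst h1; simp [pvBitsLSB]
    · rw [pvGetLast_cons _ _ (pvBits_ne_nil (m / 2) (by omega))]
      exact ih (m / 2) (by omega) (by omega)

theorem pvBhLoop_spec (n : Int) (hn : 0 < n) :
    ∀ (bits : List Char) (A b : Int), bits.getLast? = some '1' →
      pvBhLoop n bits A b = (b * A ^ (2 * pvVal bits)) % n := by
  intro bits
  induction bits with
  | nil => intro A b h; simp at h
  | cons c rest ih =>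
    intro A b hlast
    simp only [pvBhLoop]
    rw [PySem.Int.mod_eq_emod_of_pos hn]
    by_cases hr : rest = []
    · subst hr
      have hc : c = '1' := by
        have : some c = some '1' := hlast
        exact Option.some_inj.mp this
      subst hc
      simp only [pvVal, beq_self_eq_true, if_true]
      rw [PySem.Int.mod_eq_emod_of_pos hn]
      simp only [pvBhLoop]
      calc (A * A % n * b) % n = (A * A % n % n * (b % n)) % n := by rw [Int.mul_emod]
        _ = (A * A % n * (b % n)) % n := by rw [Int.emod_emod_of_dvd _ dvd_rfl]
        _ = (A * A * b) % n := by rw [← Int.mul_emod]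
        _ = (b * A ^ (2 * ((1 : Nat) + 2 * 0))) % n := by ring_nf
    · have hlast' : rest.getLast? = some '1' := by
        rwa [pvGetLast_cons _ _ hr] at hlast
      rw [ih _ _ hlast']
      have h1 : A * A % n ≡ A * A [ZMOD n] := Int.emod_emod_of_dvd _ dvd_rfl
      by_cases hc : c == '1'
      · simp only [hc, if_true, pvVal]
        rw [PySem.Int.mod_eq_emod_of_pos hn]
        have hX : (A * A % n * b % n) * (A * A % n) ^ (2 * pvVal rest)
            ≡ (A * A * b) * (A * A) ^ (2 * pvVal rest) [ZMOD n] :=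
          Int.ModEq.mul ((Int.emod_emod_of_dvd _ dvd_rfl).trans (h1.mul_right b)) (h1.pow _)
        calc (A * A % n * b % n * (A * A % n) ^ (2 * pvVal rest)) % n
            = ((A * A * b) * (A * A) ^ (2 * pvVal rest)) % n := hX
          _ = (b * A ^ (2 * ((1 : Nat) + 2 * pvVal rest))) % n := by
              congr 1
              rw [show 2 * ((1 : Nat) + 2 * pvVal rest) = 2 + 2 * pvVal rest + 2 * pvVal rest
                    by ring,
                  pow_add, pow_add]
              ring
      · simp only [hc, pvVal]
        have hX : b * (A * A % n) ^ (2 * pvVal rest)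
            ≡ b * (A * A) ^ (2 * pvVal rest) [ZMOD n] := (h1.pow _).mul_left b
        calc (b * (A * A % n) ^ (2 * pvVal rest)) % n
            = (b * (A * A) ^ (2 * pvVal rest)) % n := hX
          _ = (b * A ^ (2 * ((0 : Nat) + 2 * pvVal rest))) % n := by
              congr 1
              rw [show 2 * ((0 : Nat) + 2 * pvVal rest) = 2 * pvVal rest + 2 * pvVal rest
                    by ring,
                  pow_add]
              ring

theorem binh_spec (a k n : Int) (hn : 0 < n) (hk : 2 ≤ k) :
    binhPhuongCoLap a k n = a ^ k.toNat % n := by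
  rw [binhPhuongCoLap, if_neg (by simp; omega : ¬ (k == 0) = true)]
  have hpos : 0 < k.natAbs := by omega
  obtain ⟨c, rest, hbits⟩ : ∃ c rest, pvBitsLSB k.natAbs = c :: rest := by
    cases h : pvBitsLSB k.natAbs with
    | nil => exact absurd h (pvBits_ne_nil _ hpos)
    | cons c rest => exact ⟨c, rest, rfl⟩
  rw [hbits]
  simp only [pvBhStart]
  have hrest : rest ≠ [] := by
    intro h
    subst h
    have := pvVal_bits k.natAbs
    rw [hbits] at this
    simp only [pvVal] at this
    by_cases hc : c == '1' <;> simp [hc] at this <;> omega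
  have hlast : rest.getLast? = some '1' := by
    have := pvBits_last k.natAbs hpos
    rwa [hbits, pvGetLast_cons _ _ hrest] at this
  have hval : (if (c == '1') = true then 1 else 0) + 2 * pvVal rest = k.natAbs := by
    have := pvVal_bits k.natAbs
    rw [hbits] at this
    simpa [pvVal] using this
  have htn : k.toNat = k.natAbs := by omega
  by_cases hc : (c == '1') = true
  · rw [if_pos hc, pvBhLoop_spec n hn rest a a hlast, htn, ← hval, if_pos hc]
    congr 1
    rw [pow_add, pow_one]
  · rw [if_neg hc, pvBhLoop_spec n hn rest a 1 hlast, htn, ← hval, if_neg hc]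
    ring_nf

theorem modexp_spec (a n : Int) (hn : 0 < n) :
    ∀ (m : Nat) (k : Int), k.toNat = m → 1 ≤ k → modexp a k n = a ^ k.toNat % n := by
  intro m
  induction m using Nat.strong_induction_on with
  | _ m ih =>
    intro k hm hk
    rw [modexp, if_neg (by omega : ¬ k ≤ 0)]
    rw [PySem.Int.floordiv_eq_ediv_of_pos (by omega : (0:Int) < 2)]
    rw [PySem.Int.mod_eq_emod_of_pos (by omega : (0:Int) < 2)]
    by_cases hk1 : k = 1
    · subst hk1
      rw [show (1:Int) / 2 = 0 by decide,
          show modexp a 0 n = 1 by rw [modexp]; norm_num,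
          if_pos (by decide : ((1:Int) % 2 == 1) = true),
          PySem.Int.mod_eq_emod_of_pos hn, PySem.Int.mod_eq_emod_of_pos hn]
      have h11 : (1 * 1 % n : Int) ≡ 1 * 1 [ZMOD n] := Int.emod_emod_of_dvd _ dvd_rfl
      calc (1 * 1 % n * a) % n
          = (1 * 1 * a) % n := h11.mul_right a
        _ = a ^ (1:Int).toNat % n := by norm_num
    · have hk2 : 2 ≤ k := by omega
      have hih : modexp a (k / 2) n = a ^ (k / 2).toNat % n :=
        ih (k / 2).toNat (by omega) (k / 2) rfl (by omega)
      rw [hih]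
      simp only [PySem.Int.mod_eq_emod_of_pos hn]
      have h1 : (a ^ (k / 2).toNat % n : Int) ≡ a ^ (k / 2).toNat [ZMOD n] :=
        Int.emod_emod_of_dvd _ dvd_rfl
      have hs : (a ^ (k / 2).toNat % n * (a ^ (k / 2).toNat % n)) % n
          = a ^ (2 * (k / 2).toNat) % n := by
        calc (a ^ (k / 2).toNat % n * (a ^ (k / 2).toNat % n)) % n
            = (a ^ (k / 2).toNat * a ^ (k / 2).toNat) % n := h1.mul h1
          _ = a ^ (2 * (k / 2).toNat) % n := by
              rw [← pow_add, show (k / 2).toNat + (k / 2).toNat = 2 * (k / 2).toNat by omega]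
      by_cases hodd : k % 2 = 1
      · rw [if_pos (by simp [hodd])]
        have h3 : (a ^ (2 * (k / 2).toNat) % n : Int) ≡ a ^ (2 * (k / 2).toNat) [ZMOD n] :=
          Int.emod_emod_of_dvd _ dvd_rfl
        calc (a ^ (k / 2).toNat % n * (a ^ (k / 2).toNat % n) % n * a) % n
            = (a ^ (2 * (k / 2).toNat) % n * a) % n := by rw [hs]
          _ = (a ^ (2 * (k / 2).toNat) * a) % n := h3.mul_right a
          _ = a ^ k.toNat % n := by
              rw [← pow_succ, show 2 * (k / 2).toNat + 1 = k.toNat by omega]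
      · rw [if_neg (by simp [hodd])]
        rw [hs, show 2 * (k / 2).toNat = k.toNat by omega]

theorem helper_eq (n : Int) (hn : 3 ≤ n) (a : Int) :
    binhPhuongCoLap a (n - 1) n = modexp a (n - 1) n := by
  rw [binh_spec a (n - 1) n (by omega) (by omega),
      modexp_spec a n (by omega) (n - 1).toNat (n - 1) rfl (by omega)]

theorem loop_all (n : Int) (hn : 3 ≤ n) (t : Int) :
    ∀ (c : Nat) (i a : Int), (t + 1 - i).toNat = c → (t + 2 - a).toNat = c →
      pvFermatLoop n t i a = pvAltAll n t a := by
  intro c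
  induction c with
  | zero =>
    intro i a hi ha
    rw [pvFermatLoop, if_neg (show ¬ i < t + 1 by omega),
        pvAltAll, if_neg (show ¬ a < t + 2 by omega)]
  | succ c ih =>
    intro i a hi ha
    rw [pvFermatLoop, if_pos (show i < t + 1 by omega),
        pvAltAll, if_pos (show a < t + 2 by omega)]
    simp only [helper_eq n hn a]
    by_cases hx : modexp a (n - 1) n = 1
    · rw [if_neg (show ¬ modexp a (n - 1) n ≠ 1 by simp [hx]),
          if_pos (show (modexp a (n - 1) n == 1) = true by simp [hx])]
      exact ih (i + 1) (a + 1) (by omega) (by omega)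
    · rw [if_pos (show modexp a (n - 1) n ≠ 1 by simp [hx]),
          if_neg (show ¬ (modexp a (n - 1) n == 1) = true by simp [hx])]

theorem fermat_eq (n t : Int) : fermat n t = fermat_alt n t := by
  rw [fermat, fermat_alt]
  by_cases h1 : n < 2
  · rw [if_pos h1, if_pos h1]
  · rw [if_neg h1, if_neg h1]
    by_cases h2 : (n == 2 || n == 3) = true
    · rw [if_pos h2, if_pos h2]
    · rw [if_neg h2, if_neg h2]
      by_cases h3 : (PySem.Int.mod n 2 == 0) = true
      · rw [if_pos h3, if_pos h3]
      · rw [if_neg h3, if_neg h3]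
        have h2' : ¬(n = 2 ∨ n = 3) := by
          intro h
          apply h2
          rcases h with h | h <;> simp [h]
        have hn : 3 ≤ n := by omega
        exact loop_all n hn t t.toNat 1 2 (by omega) (by omega)

-- ===== VERDICT (by name: the statement is the Claim_ definition above) =====
theorem fermat_spec : Claim_equal_fermat := by
  intro n t _
  unfold Spec_fermat
  exact fermat_eq n t
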